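-- pv_equiv track=rewrite | github.com/kdairatchi/liffy | liffy_ultimate_unified.py | _check_lfi_parameters
-- ===== SOURCE A (Python) =====
-- from typing import List, Dict, Optional, Any, Tuple
--
-- def _check_lfi_parameters(parameters: Dict[str, List[str]]) -> bool:
--     """Check if parameters might be vulnerable to LFI"""
--     lfi_keywords = [
--         'file', 'page', 'path', 'include', 'require', 'view', 'template',
--         'doc', 'document', 'folder', 'dir', 'directory', 'read', 'load',
--         'show', 'display', 'content', 'data', 'src', 'source'
--     ]
--
--     for param_name in parameters.keys():
--         if any(keyword in param_name.lower() for keyword in lfi_keywords):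
--             return True
--
--     return False
-- ===== SOURCE B (Python) =====
-- # Position-driven multi-pattern scan: keywords are indexed by first character,
-- # and each lowered name is walked once, position by position; at each position
-- # only the suffixes filed under the current character are tested with
-- # startswith. No per-keyword substring search remains.
-- _LFI_SUFFIXES_BY_FIRST = {
--     'f': ('ile', 'older'),
--     'p': ('age', 'ath'),
--     'i': ('nclude',),
--     'r': ('equire', 'ead'),
--     'v': ('iew',),
--     't': ('emplate',),
--     'd': ('oc', 'ocument', 'ir', 'irectory', 'isplay', 'ata'),
--     'l': ('oad',),
--     's': ('how', 'rc', 'ource'),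
--     'c': ('ontent',),
-- }
--
-- def _check_lfi_parameters(parameters):
--     """Check if parameters might be vulnerable to LFI"""
--     for param_name in parameters.keys():
--         low = param_name.lower()
--         for i, ch in enumerate(low):
--             for suffix in _LFI_SUFFIXES_BY_FIRST.get(ch, ()):
--                 if low.startswith(suffix, i + 1):
--                     return True
--     return False
-- ===== Notes on version B (the rewrite author's own statement) =====
-- stated objective: alternative
-- what changed: B replaces the per-keyword substring loop with a position-driven multi-pattern matcher: the 20 keywords are indexed in a dict by first character, and each lowered name is scanned once left to right, testing at each position only the keyword suffixes filed under that character with startswith.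
import Mathlib
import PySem

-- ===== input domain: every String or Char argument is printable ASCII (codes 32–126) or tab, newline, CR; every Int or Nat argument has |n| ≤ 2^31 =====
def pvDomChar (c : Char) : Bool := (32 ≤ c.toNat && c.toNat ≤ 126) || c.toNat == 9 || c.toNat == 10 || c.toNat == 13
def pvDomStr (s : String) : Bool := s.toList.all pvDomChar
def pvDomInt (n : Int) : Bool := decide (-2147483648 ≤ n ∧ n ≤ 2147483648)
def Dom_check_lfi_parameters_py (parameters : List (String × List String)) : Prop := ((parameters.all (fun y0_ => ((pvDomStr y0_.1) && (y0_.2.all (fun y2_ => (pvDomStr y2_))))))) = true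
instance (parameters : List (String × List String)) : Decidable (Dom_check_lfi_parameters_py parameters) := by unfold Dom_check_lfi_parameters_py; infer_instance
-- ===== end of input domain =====

-- B replaces A's per-keyword substring loop by a position-driven multi-pattern scan:
-- keyword suffixes indexed by first character in a dict, each lowered name walked once.
-- Return value only; no mutation in either version.

-- ===== PORT A =====
def lfiKeywords : List String :=
  ["file", "page", "path", "include", "require", "view", "template",
   "doc", "document", "folder", "dir", "directory", "read", "load",
   "show", "display", "content", "data", "src", "source"]

-- for param_name in parameters.keys(): if any(keyword in param_name.lower() for keyword in lfi_keywords): return True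
def check_lfi_parameters_py (parameters : List (String × List String)) : Bool :=
  (PySem.Dict.mk parameters).keys.any (fun param_name =>
    lfiKeywords.any (fun keyword => PySem.Str.isIn keyword (PySem.Str.lower param_name)))

-- ===== PORT B =====
-- _LFI_SUFFIXES_BY_FIRST: keyword tails filed under the keyword's first character
def lfiSuffixTable : List (Char × List String) :=
  [('f', ["ile", "older"]), ('p', ["age", "ath"]), ('i', ["nclude"]),
   ('r', ["equire", "ead"]), ('v', ["iew"]), ('t', ["emplate"]),
   ('d', ["oc", "ocument", "ir", "irectory", "isplay", "ata"]),
   ('l', ["oad"]), ('s', ["how", "rc", "ource"]), ('c', ["ontent"])]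

-- for i, ch in enumerate(low): for suffix in table.get(ch, ()): if low.startswith(suffix, i + 1): return True
-- (the position loop is the structural recursion over the character list: at position i the
--  current character is the head and the characters after position i are the tail)
def scanLow : List Char → Bool
  | [] => false
  | ch :: rest =>
      (((PySem.Dict.mk lfiSuffixTable).getD ch []).any
        (fun suffix => PySem.Chars.startswith rest suffix.toList)) || scanLow rest

def check_lfi_parameters_py_alt (parameters : List (String × List String)) : Bool :=
  (PySem.Dict.mk parameters).keys.any (fun param_name =>
    scanLow (PySem.Str.lower param_name).toList)

-- ===== PRECONDITION & SPEC =====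
def Spec_check_lfi_parameters_py (parameters : List (String × List String)) (out : Bool) : Prop := out = check_lfi_parameters_py_alt parameters
instance (parameters : List (String × List String)) (out : Bool) : Decidable (Spec_check_lfi_parameters_py parameters out) := by unfold Spec_check_lfi_parameters_py; infer_instance

-- ===== CLAIM (what is proved, stated in full; the proofs are below) =====
def Claim_equal_check_lfi_parameters_py : Prop := ∀ (parameters : List (String × List String)), Dom_check_lfi_parameters_py parameters → Spec_check_lfi_parameters_py parameters (check_lfi_parameters_py parameters)

-- ===== LEMMAS AND PROOFS =====

-- the keyword disjunction, spelled out
theorem kwAny (p : List Char) : (∃ k ∈ lfiKeywords, k.toList <+: p) ↔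
    (("file".toList <+: p) ∨
      ("page".toList <+: p) ∨
      ("path".toList <+: p) ∨
      ("include".toList <+: p) ∨
      ("require".toList <+: p) ∨
      ("view".toList <+: p) ∨
      ("template".toList <+: p) ∨
      ("doc".toList <+: p) ∨
      ("document".toList <+: p) ∨
      ("folder".toList <+: p) ∨
      ("dir".toList <+: p) ∨
      ("directory".toList <+: p) ∨
      ("read".toList <+: p) ∨
      ("load".toList <+: p) ∨
      ("show".toList <+: p) ∨
      ("display".toList <+: p) ∨
      ("content".toList <+: p) ∨
      ("data".toList <+: p) ∨
      ("src".toList <+: p) ∨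
      ("source".toList <+: p)) := by
  simp [lfiKeywords]

theorem pk_file (c : Char) (rest : List Char) :
    ("file".toList <+: c :: rest) ↔ (c = 'f' ∧ "ile".toList <+: rest) := by
  rw [show "file".toList = 'f' :: "ile".toList from rfl, List.cons_prefix_cons, eq_comm]

theorem pk_page (c : Char) (rest : List Char) :
    ("page".toList <+: c :: rest) ↔ (c = 'p' ∧ "age".toList <+: rest) := by
  rw [show "page".toList = 'p' :: "age".toList from rfl, List.cons_prefix_cons, eq_comm]

theorem pk_path (c : Char) (rest : List Char) :
    ("path".toList <+: c :: rest) ↔ (c = 'p' ∧ "ath".toList <+: rest) := by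
  rw [show "path".toList = 'p' :: "ath".toList from rfl, List.cons_prefix_cons, eq_comm]

theorem pk_include (c : Char) (rest : List Char) :
    ("include".toList <+: c :: rest) ↔ (c = 'i' ∧ "nclude".toList <+: rest) := by
  rw [show "include".toList = 'i' :: "nclude".toList from rfl, List.cons_prefix_cons, eq_comm]

theorem pk_require (c : Char) (rest : List Char) :
    ("require".toList <+: c :: rest) ↔ (c = 'r' ∧ "equire".toList <+: rest) := by
  rw [show "require".toList = 'r' :: "equire".toList from rfl, List.cons_prefix_cons, eq_comm]

theorem pk_view (c : Char) (rest : List Char) :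
    ("view".toList <+: c :: rest) ↔ (c = 'v' ∧ "iew".toList <+: rest) := by
  rw [show "view".toList = 'v' :: "iew".toList from rfl, List.cons_prefix_cons, eq_comm]

theorem pk_template (c : Char) (rest : List Char) :
    ("template".toList <+: c :: rest) ↔ (c = 't' ∧ "emplate".toList <+: rest) := by
  rw [show "template".toList = 't' :: "emplate".toList from rfl, List.cons_prefix_cons, eq_comm]

theorem pk_doc (c : Char) (rest : List Char) :
    ("doc".toList <+: c :: rest) ↔ (c = 'd' ∧ "oc".toList <+: rest) := by
  rw [show "doc".toList = 'd' :: "oc".toList from rfl, List.cons_prefix_cons, eq_comm]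

theorem pk_document (c : Char) (rest : List Char) :
    ("document".toList <+: c :: rest) ↔ (c = 'd' ∧ "ocument".toList <+: rest) := by
  rw [show "document".toList = 'd' :: "ocument".toList from rfl, List.cons_prefix_cons, eq_comm]

theorem pk_folder (c : Char) (rest : List Char) :
    ("folder".toList <+: c :: rest) ↔ (c = 'f' ∧ "older".toList <+: rest) := by
  rw [show "folder".toList = 'f' :: "older".toList from rfl, List.cons_prefix_cons, eq_comm]

theorem pk_dir (c : Char) (rest : List Char) :
    ("dir".toList <+: c :: rest) ↔ (c = 'd' ∧ "ir".toList <+: rest) := by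
  rw [show "dir".toList = 'd' :: "ir".toList from rfl, List.cons_prefix_cons, eq_comm]

theorem pk_directory (c : Char) (rest : List Char) :
    ("directory".toList <+: c :: rest) ↔ (c = 'd' ∧ "irectory".toList <+: rest) := by
  rw [show "directory".toList = 'd' :: "irectory".toList from rfl, List.cons_prefix_cons, eq_comm]

theorem pk_read (c : Char) (rest : List Char) :
    ("read".toList <+: c :: rest) ↔ (c = 'r' ∧ "ead".toList <+: rest) := by
  rw [show "read".toList = 'r' :: "ead".toList from rfl, List.cons_prefix_cons, eq_comm]

theorem pk_load (c : Char) (rest : List Char) :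
    ("load".toList <+: c :: rest) ↔ (c = 'l' ∧ "oad".toList <+: rest) := by
  rw [show "load".toList = 'l' :: "oad".toList from rfl, List.cons_prefix_cons, eq_comm]

theorem pk_show (c : Char) (rest : List Char) :
    ("show".toList <+: c :: rest) ↔ (c = 's' ∧ "how".toList <+: rest) := by
  rw [show "show".toList = 's' :: "how".toList from rfl, List.cons_prefix_cons, eq_comm]

theorem pk_display (c : Char) (rest : List Char) :
    ("display".toList <+: c :: rest) ↔ (c = 'd' ∧ "isplay".toList <+: rest) := by
  rw [show "display".toList = 'd' :: "isplay".toList from rfl, List.cons_prefix_cons, eq_comm]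

theorem pk_content (c : Char) (rest : List Char) :
    ("content".toList <+: c :: rest) ↔ (c = 'c' ∧ "ontent".toList <+: rest) := by
  rw [show "content".toList = 'c' :: "ontent".toList from rfl, List.cons_prefix_cons, eq_comm]

theorem pk_data (c : Char) (rest : List Char) :
    ("data".toList <+: c :: rest) ↔ (c = 'd' ∧ "ata".toList <+: rest) := by
  rw [show "data".toList = 'd' :: "ata".toList from rfl, List.cons_prefix_cons, eq_comm]

theorem pk_src (c : Char) (rest : List Char) :
    ("src".toList <+: c :: rest) ↔ (c = 's' ∧ "rc".toList <+: rest) := by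
  rw [show "src".toList = 's' :: "rc".toList from rfl, List.cons_prefix_cons, eq_comm]

theorem pk_source (c : Char) (rest : List Char) :
    ("source".toList <+: c :: rest) ↔ (c = 's' ∧ "ource".toList <+: rest) := by
  rw [show "source".toList = 's' :: "ource".toList from rfl, List.cons_prefix_cons, eq_comm]

-- a character that heads no keyword has no entry in the suffix table
theorem tableNone (c : Char) (h1 : c ≠ 'f') (h2 : c ≠ 'p') (h3 : c ≠ 'i') (h4 : c ≠ 'r')
    (h5 : c ≠ 'v') (h6 : c ≠ 't') (h7 : c ≠ 'd') (h8 : c ≠ 'l') (h9 : c ≠ 's') (h10 : c ≠ 'c') :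
    (PySem.Dict.mk lfiSuffixTable).getD c [] = [] := by
  simp [lfiSuffixTable, PySem.Dict.getD, PySem.Dict.get?,
    beq_iff_eq, Ne.symm h1, Ne.symm h2, Ne.symm h3, Ne.symm h4, Ne.symm h5,
    Ne.symm h6, Ne.symm h7, Ne.symm h8, Ne.symm h9, Ne.symm h10]

-- a hit of the suffix table at the current position is exactly a keyword prefix here
theorem headHit (c : Char) (rest : List Char) :
    (((PySem.Dict.mk lfiSuffixTable).getD c []).any
        (fun suffix => PySem.Chars.startswith rest suffix.toList) = true)
      ↔ ∃ k ∈ lfiKeywords, k.toList <+: c :: rest := by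
  rw [kwAny]
  simp only [pk_file, pk_page, pk_path, pk_include, pk_require, pk_view, pk_template, pk_doc, pk_document, pk_folder, pk_dir, pk_directory, pk_read, pk_load, pk_show, pk_display, pk_content, pk_data, pk_src, pk_source]
  by_cases hf : c = 'f'
  · subst hf
    rw [show (PySem.Dict.mk lfiSuffixTable).getD 'f' [] = ["ile", "older"] from rfl]
    simp [PySem.Chars.startswith_iff]
  by_cases hp : c = 'p'
  · subst hp
    rw [show (PySem.Dict.mk lfiSuffixTable).getD 'p' [] = ["age", "ath"] from rfl]
    simp [PySem.Chars.startswith_iff]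
  by_cases hi : c = 'i'
  · subst hi
    rw [show (PySem.Dict.mk lfiSuffixTable).getD 'i' [] = ["nclude"] from rfl]
    simp [PySem.Chars.startswith_iff]
  by_cases hr : c = 'r'
  · subst hr
    rw [show (PySem.Dict.mk lfiSuffixTable).getD 'r' [] = ["equire", "ead"] from rfl]
    simp [PySem.Chars.startswith_iff]
  by_cases hv : c = 'v'
  · subst hv
    rw [show (PySem.Dict.mk lfiSuffixTable).getD 'v' [] = ["iew"] from rfl]
    simp [PySem.Chars.startswith_iff]
  by_cases ht : c = 't'
  · subst ht
    rw [show (PySem.Dict.mk lfiSuffixTable).getD 't' [] = ["emplate"] from rfl]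
    simp [PySem.Chars.startswith_iff]
  by_cases hd : c = 'd'
  · subst hd
    rw [show (PySem.Dict.mk lfiSuffixTable).getD 'd' [] = ["oc", "ocument", "ir", "irectory", "isplay", "ata"] from rfl]
    simp [PySem.Chars.startswith_iff]
  by_cases hl : c = 'l'
  · subst hl
    rw [show (PySem.Dict.mk lfiSuffixTable).getD 'l' [] = ["oad"] from rfl]
    simp [PySem.Chars.startswith_iff]
  by_cases hs : c = 's'
  · subst hs
    rw [show (PySem.Dict.mk lfiSuffixTable).getD 's' [] = ["how", "rc", "ource"] from rfl]
    simp [PySem.Chars.startswith_iff]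
  by_cases hc : c = 'c'
  · subst hc
    rw [show (PySem.Dict.mk lfiSuffixTable).getD 'c' [] = ["ontent"] from rfl]
    simp [PySem.Chars.startswith_iff]
  · rw [tableNone c hf hp hi hr hv ht hd hl hs hc]
    simp [hf, hp, hi, hr, hv, ht, hd, hl, hs, hc]

-- the position scan finds exactly the keyword infixes
theorem scanLow_iff (l : List Char) :
    scanLow l = true ↔ ∃ k ∈ lfiKeywords, k.toList <:+: l := by
  induction l with
  | nil =>
    simp [scanLow, lfiKeywords, List.infix_nil]
  | cons c rest ih =>
    simp only [scanLow, Bool.or_eq_true, ih, headHit]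
    constructor
    · rintro (⟨k, hk, h⟩ | ⟨k, hk, h⟩)
      · exact ⟨k, hk, h.isInfix⟩
      · exact ⟨k, hk, h.trans (List.infix_cons_iff.mpr (Or.inr List.infix_rfl))⟩
    · rintro ⟨k, hk, h⟩
      rcases List.infix_cons_iff.mp h with h | h
      · exact Or.inl ⟨k, hk, h⟩
      · exact Or.inr ⟨k, hk, h⟩

-- per name: A's keyword loop and B's position scan agree
theorem perName (s : String) :
    lfiKeywords.any (fun keyword => PySem.Str.isIn keyword (PySem.Str.lower s))
      = scanLow (PySem.Str.lower s).toList := by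
  rw [Bool.eq_iff_iff, scanLow_iff, List.any_eq_true]
  constructor
  · rintro ⟨k, hk, h⟩
    exact ⟨k, hk, (PySem.Str.isIn_iff_infix _ _).mp h⟩
  · rintro ⟨k, hk, h⟩
    exact ⟨k, hk, (PySem.Str.isIn_iff_infix _ _).mpr h⟩

-- ===== VERDICT (by name: the statement is the Claim_ definition above) =====
theorem check_lfi_parameters_py_spec : Claim_equal_check_lfi_parameters_py := by
  intro parameters _
  unfold Spec_check_lfi_parameters_py check_lfi_parameters_py check_lfi_parameters_py_alt
  exact congrArg _ (funext fun s => perName s)
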